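-- pv_equiv track=rewrite | github.com/cmudrc/design-research-experiments | src/design_research_experiments/study.py | _duplicate_errors
-- ===== SOURCE A (Python) =====
-- from collections.abc import Mapping, Sequence
--
-- def _duplicate_errors(label: str, names: Sequence[str]) -> list[str]:
--     """Return duplicate-name errors for one label class."""
--     seen: set[str] = set()
--     errors: list[str] = []
--     for name in names:
--         if name in seen:
--             errors.append(f"Duplicate {label} name detected: '{name}'.")
--         seen.add(name)
--     return errors
-- ===== SOURCE B (Python) =====
-- from collections.abc import Mapping, Sequence
--
-- def _duplicate_errors(label: str, names: Sequence[str]) -> list[str]: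
--     """Return duplicate-name errors for one label class."""
--     leftovers = list(names)
--     for name in dict.fromkeys(names):  # each distinct name, in first-occurrence order
--         leftovers.remove(name)         # delete that name's first occurrence
--     return [f"Duplicate {label} name detected: '{name}'." for name in leftovers]
-- ===== Notes on version B (the rewrite author's own statement) =====
-- stated objective: alternative
-- what changed: Instead of one pass with a seen-set that appends an error per repeated occurrence, B deletes the first occurrence of each distinct name from a copy of the list and maps the message over the remaining occurrences, which are exactly the duplicates in original order.
import Mathlib
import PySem

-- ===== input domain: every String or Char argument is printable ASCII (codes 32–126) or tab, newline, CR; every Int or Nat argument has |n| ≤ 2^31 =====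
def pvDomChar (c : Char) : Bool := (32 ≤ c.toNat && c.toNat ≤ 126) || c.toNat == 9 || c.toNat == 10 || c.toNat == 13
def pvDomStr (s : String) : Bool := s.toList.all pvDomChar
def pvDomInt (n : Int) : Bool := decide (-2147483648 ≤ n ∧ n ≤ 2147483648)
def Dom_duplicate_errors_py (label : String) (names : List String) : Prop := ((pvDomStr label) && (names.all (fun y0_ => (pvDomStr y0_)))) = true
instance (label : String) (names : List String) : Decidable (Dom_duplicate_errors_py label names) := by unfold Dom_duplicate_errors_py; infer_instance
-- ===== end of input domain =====

-- B replaces A's single seen-set pass by a two-stage deletion algorithm: remove each distinct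
-- name's first occurrence from a copy of the list, then map the message over the remainder
-- (alternative decomposition; not faster).

-- the f-string both Pythons build
def pvMsg (label name : String) : String :=
  "Duplicate " ++ label ++ " name detected: '" ++ name ++ "'."

-- ===== PORT A =====
def duplicate_errors_py (label : String) (names : List String) : List String :=
  (names.foldl
    (fun (st : PySem.Set String × List String) name =>
      (PySem.Set.add st.1 name,
       if PySem.Set.contains st.1 name then st.2 ++ [pvMsg label name] else st.2))
    (PySem.Set.empty, [])).2

-- ===== PORT B =====
-- leftovers.remove(name): PySem.List.remove? never returns none on the states this fold
-- reaches (each distinct name of `names` is still present when its turn comes — this is part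
-- of what the equivalence proof establishes), so `.getD lst` is exact here.
def duplicate_errors_py_alt (label : String) (names : List String) : List String :=
  ((PySem.List.dedup names).foldl
      (fun lst name => (PySem.List.remove? lst name).getD lst)
      names).map (fun name => pvMsg label name)

-- ===== PRECONDITION & SPEC =====
def Spec_duplicate_errors_py (label : String) (names : List String) (out : List String) : Prop := out = duplicate_errors_py_alt label names
instance (label : String) (names : List String) (out : List String) : Decidable (Spec_duplicate_errors_py label names out) := by unfold Spec_duplicate_errors_py; infer_instance

-- ===== CLAIM (what is proved, stated in full; the proofs are below) =====
def Claim_equal_duplicate_errors_py : Prop := ∀ (label : String) (names : List String), Dom_duplicate_errors_py label names → Spec_duplicate_errors_py label names (duplicate_errors_py label names)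

-- ===== LEMMAS AND PROOFS =====

-- the distinct elements of l not already in s, first-occurrence order (recursion mirror of Set.ofList)
def pvDni (s l : List String) : List String :=
  match l with
  | [] => []
  | a :: t => if a ∈ s then pvDni s t else a :: pvDni (s ++ [a]) t

-- the duplicate occurrences of l relative to the already-seen names s, in order
def pvDup (s l : List String) : List String :=
  match l with
  | [] => []
  | a :: t => if a ∈ s then a :: pvDup s t else pvDup (s ++ [a]) t

-- one remove-first step of B's fold
def pvStep (lst : List String) (name : String) : List String :=
  (PySem.List.remove? lst name).getD lst

theorem pv_foldl_add (l : List String) : ∀ s : List String,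
    l.foldl PySem.Set.add s = s ++ pvDni s l := by
  induction l with
  | nil => intro s; simp [pvDni]
  | cons a t ih =>
    intro s
    by_cases h : a ∈ s
    · simp [pvDni, h, PySem.Set.add, ih]
    · simp only [List.foldl_cons, pvDni, h]
      have : PySem.Set.add s a = s ++ [a] := by
        simp [PySem.Set.add, h]
      rw [this, ih]
      simp

theorem pv_dup_msgs (label : String) (l : List String) : ∀ (s acc : List String),
    (l.foldl
      (fun (st : PySem.Set String × List String) name =>
        (PySem.Set.add st.1 name,
         if PySem.Set.contains st.1 name then st.2 ++ [pvMsg label name] else st.2))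
      (s, acc)).2 = acc ++ (pvDup s l).map (pvMsg label) := by
  induction l with
  | nil => intro s acc; simp [pvDup]
  | cons a t ih =>
    intro s acc
    by_cases h : a ∈ s
    · have hadd : PySem.Set.add s a = s := by
        simp [PySem.Set.add, h]
      have hc : PySem.Set.contains s a = true := by
        simp [PySem.Set.contains_iff, h]
      simp only [List.foldl_cons, hc, if_true, hadd]
      rw [ih s (acc ++ [pvMsg label a])]
      simp [pvDup, h]
    · have hadd : PySem.Set.add s a = s ++ [a] := by
        simp [PySem.Set.add, h]
      have hc : PySem.Set.contains s a = false := by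
        simp [PySem.Set.contains_iff, h]
      simp only [List.foldl_cons, hc, Bool.false_eq_true, if_false, hadd]
      rw [ih (s ++ [a]) acc]
      simp [pvDup, h]

theorem pv_dni_not_mem (l : List String) : ∀ s x, x ∈ pvDni s l → x ∉ s := by
  induction l with
  | nil => intro s x h; simp [pvDni] at h
  | cons a t ih =>
    intro s x h
    by_cases ha : a ∈ s
    · exact ih s x (by simpa [pvDni, ha] using h)
    · simp only [pvDni, if_neg ha, List.mem_cons] at h
      rcases h with rfl | h
      · exact ha
      · have := ih (s ++ [a]) x h
        intro hx; exact this (by simp [hx])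

theorem pv_remove_head_ne (a name : String) (t : List String) (h : name ≠ a) :
    pvStep (a :: t) name = a :: pvStep t name := by
  have hne : (a == name) = false := by simpa [beq_iff_eq] using fun e => h e.symm
  cases hidx : List.idxOf? name t with
  | none => simp [pvStep, PySem.List.remove?, List.idxOf?_cons, hne, hidx]
  | some k => simp [pvStep, PySem.List.remove?, List.idxOf?_cons, hne, hidx, List.eraseIdx_cons_succ]

theorem pv_foldl_skip_head (a : String) (ds : List String) (ha : a ∉ ds) :
    ∀ t : List String, ds.foldl pvStep (a :: t) = a :: ds.foldl pvStep t := by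
  induction ds with
  | nil => intro t; simp
  | cons d ds ih =>
    intro t
    have hd : d ≠ a := fun e => ha (by simp [e])
    have hds : a ∉ ds := fun h => ha (by simp [h])
    simp only [List.foldl_cons, pv_remove_head_ne a d t hd]
    exact (ih hds) (pvStep t d)

theorem pv_main (l : List String) : ∀ s : List String,
    (pvDni s l).foldl pvStep l = pvDup s l := by
  induction l with
  | nil => intro s; simp [pvDni, pvDup]
  | cons a t ih =>
    intro s
    by_cases h : a ∈ s
    · have hnot : a ∉ pvDni s t := fun hm => pv_dni_not_mem t s a hm h
      simp only [pvDni, pvDup, if_pos h]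
      rw [pv_foldl_skip_head a (pvDni s t) hnot t, ih s]
    · simp only [pvDni, pvDup, if_neg h, List.foldl_cons]
      have hstep : pvStep (a :: t) a = t := by
        simp [pvStep, PySem.List.remove?, List.idxOf?_cons]
      rw [hstep, ih (s ++ [a])]

-- ===== VERDICT (by name: the statement is the Claim_ definition above) =====
theorem duplicate_errors_py_spec : Claim_equal_duplicate_errors_py := by
  intro label names _
  unfold Spec_duplicate_errors_py duplicate_errors_py duplicate_errors_py_alt
  rw [pv_dup_msgs label names PySem.Set.empty []]
  have hd : PySem.List.dedup names = pvDni [] names := by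
    rw [PySem.List.dedup, PySem.Set.ofList_eq_foldl, pv_foldl_add names []]
    simp
  rw [hd]
  have : (pvDni [] names).foldl
      (fun lst name => (PySem.List.remove? lst name).getD lst) names
      = (pvDni [] names).foldl pvStep names := rfl
  rw [this, pv_main names []]
  simp [PySem.Set.empty]
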